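-- pv_equiv track=rewrite | github.com/AleksanderStudnicki/OX | pipeTest.py | generateDraw
-- ===== SOURCE A (Python) =====
-- def generateDraw(dimension):
--     first_pattern = []
--     second_pattern = []
--
--     draw_pattern = []
--
--     counter = 0
--
--     for i in range(1, dimension + 1):
--         if i % 2 == 1:
--             first_pattern.append(i - 1)
--         else:
--             second_pattern.append(i - 1)
--
--     current_pattern = first_pattern
--
--     for i in range(0, dimension):
--         if counter == 2:
--             if current_pattern == first_pattern:
--                 current_pattern = second_pattern
--             else:
--                 current_pattern = first_pattern
--             counter = 0
--         for field in current_pattern: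
--             draw_pattern.append(field + i * dimension)
--         counter += 1
--
--     return draw_pattern
-- ===== SOURCE B (Python) =====
-- def generateDraw(dimension):
--     if dimension <= 0:
--         return []
--     d = dimension
--     # one full period of the pattern: the flat cell indices kept among the
--     # first four rows (column parity == two-row block parity)
--     base = [k for k in range(4 * d) if (k % d + k // (2 * d)) % 2 == 0]
--     out = []
--     nfull = d * d // (4 * d)
--     for t in range(nfull):
--         q = 4 * d * t
--         out += [k + q for k in base]
--     q = 4 * d * nfull
--     out += [k + q for k in base if k + q < d * d]
--     return out
-- ===== Notes on version B (the rewrite author's own statement) =====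
-- stated objective: alternative
-- what changed: Instead of A's row enumeration with two pre-built pattern lists and a counter/list-identity state machine, B works on flat cell indices: it computes one full 4-row period of kept indices with the parity test (k % d + k // (2*d)) % 2 == 0 and then tiles that period across the board by translating it by multiples of 4*d, trimming at d*d; correct because A's appended value field + i*dimension is exactly the flat cell index and the kept-cell pattern is periodic with period 4*d.
import Mathlib
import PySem

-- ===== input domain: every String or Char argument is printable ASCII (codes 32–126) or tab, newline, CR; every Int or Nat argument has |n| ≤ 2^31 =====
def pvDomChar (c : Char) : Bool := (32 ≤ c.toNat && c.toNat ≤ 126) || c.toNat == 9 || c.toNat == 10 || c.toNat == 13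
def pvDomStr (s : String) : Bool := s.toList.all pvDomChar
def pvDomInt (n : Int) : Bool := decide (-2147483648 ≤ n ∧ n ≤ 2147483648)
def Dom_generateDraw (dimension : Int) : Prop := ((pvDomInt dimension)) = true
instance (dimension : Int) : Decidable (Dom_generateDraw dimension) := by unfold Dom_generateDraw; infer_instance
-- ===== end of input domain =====

-- B replaces A's row enumeration (pattern-list pre-pass plus a counter/list-comparison state
-- machine) by computing one 4-row period of kept flat cell indices and tiling it by translation
-- across the board (objective: alternative).

-- ===== PORT A =====
def generateDraw (dimension : Int) : List Int :=
  -- first loop: build first_pattern / second_pattern as a pair state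
  let pats := (PySem.List.pyRange 1 (dimension + 1) 1).foldl
    (fun (p : List Int × List Int) i =>
      if PySem.Int.mod i 2 == 1 then (p.1 ++ [i - 1], p.2) else (p.1, p.2 ++ [i - 1]))
    ([], [])
  let first_pattern := pats.1
  let second_pattern := pats.2
  -- second loop: state (counter, current_pattern, draw_pattern)
  let st := (PySem.List.pyRange 0 dimension 1).foldl
    (fun (s : Int × List Int × List Int) i =>
      let cc : Int × List Int :=
        if s.1 == 2 then
          (0, if s.2.1 == first_pattern then second_pattern else first_pattern)
        else (s.1, s.2.1)
      (cc.1 + 1, cc.2,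
        cc.2.foldl (fun dp field => dp ++ [field + i * dimension]) s.2.2))
    (0, first_pattern, [])
  st.2.2

-- ===== PORT B =====
def generateDraw_alt (dimension : Int) : List Int :=
  if dimension ≤ 0 then []
  else
    let base := (PySem.List.pyRange 0 (4 * dimension) 1).filter
      (fun k =>
        PySem.Int.mod (PySem.Int.mod k dimension + PySem.Int.floordiv k (2 * dimension)) 2 == 0)
    let nfull := PySem.Int.floordiv (dimension * dimension) (4 * dimension)
    let out := (PySem.List.pyRange 0 nfull 1).foldl
      (fun out t => out ++ base.map (fun k => k + 4 * dimension * t)) []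
    out ++ (base.filter (fun k => decide (k + 4 * dimension * nfull < dimension * dimension))).map
      (fun k => k + 4 * dimension * nfull)

-- ===== PRECONDITION & SPEC =====
def Spec_generateDraw (dimension : Int) (out : List Int) : Prop := out = generateDraw_alt dimension
instance (dimension : Int) (out : List Int) : Decidable (Spec_generateDraw dimension out) := by unfold Spec_generateDraw; infer_instance

-- ===== CLAIM (what is proved, stated in full; the proofs are below) =====
def Claim_equal_generateDraw : Prop := ∀ (dimension : Int), Dom_generateDraw dimension → Spec_generateDraw dimension (generateDraw dimension)

-- ===== LEMMAS AND PROOFS =====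

-- the two parity patterns A's first loop builds, in closed form
def pvEvens (n : Nat) : List Int := (List.range ((n + 1) / 2)).map (fun k : Nat => 2 * (k : Int))
def pvOdds (n : Nat) : List Int := (List.range (n / 2)).map (fun k : Nat => 1 + 2 * (k : Int))

-- the row pattern A uses at row i (i ≥ 0)
def pvPat (F S : List Int) (i : Int) : List Int :=
  if PySem.Int.mod (PySem.Int.floordiv i 2) 2 == 0 then F else S

-- B's filter predicate (definitionally the lambda in generateDraw_alt)
def pvP (n : Int) (k : Int) : Bool :=
  PySem.Int.mod (PySem.Int.mod k n + PySem.Int.floordiv k (2 * n)) 2 == 0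

lemma pvEvens_succ_even (n : Nat) (h : n % 2 = 0) : pvEvens (n + 1) = pvEvens n ++ [(n : Int)] := by
  unfold pvEvens
  rw [show (n + 1 + 1) / 2 = (n + 1) / 2 + 1 by omega, List.range_succ, List.map_append]
  congr 1
  simp
  omega

lemma pvOdds_succ_even (n : Nat) (h : n % 2 = 0) : pvOdds (n + 1) = pvOdds n := by
  unfold pvOdds
  rw [show (n + 1) / 2 = n / 2 by omega]

lemma pvEvens_succ_odd (n : Nat) (h : n % 2 = 1) : pvEvens (n + 1) = pvEvens n := by
  unfold pvEvens
  rw [show (n + 1 + 1) / 2 = (n + 1) / 2 by omega]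

lemma pvOdds_succ_odd (n : Nat) (h : n % 2 = 1) : pvOdds (n + 1) = pvOdds n ++ [(n : Int)] := by
  unfold pvOdds
  rw [show (n + 1) / 2 = n / 2 + 1 by omega, List.range_succ, List.map_append]
  congr 1
  simp
  omega

lemma pvFirstLoop (n : Nat) :
    (PySem.List.pyRange 1 ((n : Int) + 1) 1).foldl
      (fun (p : List Int × List Int) i =>
        if PySem.Int.mod i 2 == 1 then (p.1 ++ [i - 1], p.2) else (p.1, p.2 ++ [i - 1]))
      ([], []) = (pvEvens n, pvOdds n) := by
  induction n with
  | zero => simp [PySem.List.pyRange_one_eq_nil, pvEvens, pvOdds]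
  | succ n ih =>
    rw [show (((n + 1 : Nat) : Int)) + 1 = ((n : Int) + 1) + 1 by push_cast; ring,
        PySem.List.pyRange_one_succ_right (by omega), List.foldl_append, ih]
    simp only [List.foldl]
    have hm : PySem.Int.mod ((n : Int) + 1) 2 = (((n + 1) % 2 : Nat) : Int) := by
      exact_mod_cast PySem.Int.mod_natCast (n + 1) 2
    rcases Nat.even_or_odd n with he | ho
    · have hne : n % 2 = 0 := Nat.even_iff.mp he
      have h2 : ((n + 1) % 2 : Nat) = 1 := by omega
      rw [hm, h2, Nat.cast_one, show ((1 : Int) == 1) = true from rfl, if_pos rfl,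
          pvEvens_succ_even n hne, pvOdds_succ_even n hne]
      refine Prod.ext ?_ rfl
      show pvEvens n ++ [(n : Int) + 1 - 1] = pvEvens n ++ [(n : Int)]
      congr 1
      simp
    · have hno : n % 2 = 1 := Nat.odd_iff.mp ho
      have h2 : ((n + 1) % 2 : Nat) = 0 := by omega
      rw [hm, h2, Nat.cast_zero, show ((0 : Int) == 1) = false from rfl, if_neg (by simp),
          pvEvens_succ_odd n hno, pvOdds_succ_odd n hno]
      refine Prod.ext rfl ?_
      show pvOdds n ++ [(n : Int) + 1 - 1] = pvOdds n ++ [(n : Int)]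
      congr 1
      simp

lemma pvEvens_ne_pvOdds (n : Nat) (hn : 1 ≤ n) : pvEvens n ≠ pvOdds n := by
  intro h
  have h0 : (0 : Int) ∈ pvEvens n :=
    List.mem_map.mpr ⟨0, List.mem_range.mpr (by omega), by norm_num⟩
  rw [h] at h0
  obtain ⟨k, -, hk⟩ := List.mem_map.mp h0
  omega

-- A's counter/current-pattern state machine, characterised after n ≥ 1 rows
lemma pvSecondLoop (d : Int) (F S : List Int) (hFS : F ≠ S) (n : Nat) (hn : 1 ≤ n) :
    (PySem.List.pyRange 0 (n : Int) 1).foldl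
      (fun (s : Int × List Int × List Int) i =>
        let cc : Int × List Int :=
          if s.1 == 2 then (0, if s.2.1 == F then S else F) else (s.1, s.2.1)
        (cc.1 + 1, cc.2,
          cc.2.foldl (fun dp field => dp ++ [field + i * d]) s.2.2))
      (0, F, [])
    = ((((n - 1) % 2 : Nat) : Int) + 1, pvPat F S ((n : Int) - 1),
       (PySem.List.pyRange 0 (n : Int) 1).flatMap
         (fun i => (pvPat F S i).map (fun field => field + i * d))) := by
  have hSF : ((S == F) = true) → False := fun h => hFS (beq_iff_eq.mp h).symm
  induction n with
  | zero => omega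
  | succ n ih =>
    rw [show (((n + 1 : Nat) : Int)) = (n : Int) + 1 by push_cast; ring,
        PySem.List.pyRange_one_succ_right (by omega), List.foldl_append,
        List.flatMap_append]
    rcases Nat.eq_zero_or_pos n with h0 | hpos
    · subst h0
      simp only [Nat.cast_zero, PySem.List.pyRange_one_eq_nil (le_refl (0 : Int)),
        List.foldl, List.flatMap_nil, List.nil_append]
      have hpat : pvPat F S 0 = F := by
        simp [pvPat, PySem.Int.floordiv, PySem.Int.mod]
      rw [show ((0 : Int) == 2) = false from rfl]
      simp only [Bool.false_eq_true, if_false, PySem.List.foldl_append_singleton_eq_map,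
        List.nil_append, List.flatMap_cons, List.flatMap_nil, List.append_nil]
      rw [show (0 : Int) + 1 - 1 = 0 by ring, hpat]
      norm_num
    · rw [ih hpos]
      simp only [List.foldl]
      have hdm : ∀ m : Nat, PySem.Int.mod (PySem.Int.floordiv ((m : Int)) 2) 2
          = ((m / 2 % 2 : Nat) : Int) := by
        intro m
        rw [show PySem.Int.floordiv ((m : Int)) 2 = ((m / 2 : Nat) : Int) from
              PySem.Int.floordiv_natCast m 2]
        exact PySem.Int.mod_natCast (m / 2) 2
      have hpatn : pvPat F S ((n : Int)) = if n / 2 % 2 = 0 then F else S := by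
        simp only [pvPat, hdm n, beq_iff_eq, Nat.cast_eq_zero]
      have hpatn1 : pvPat F S ((n : Int) - 1) = if (n - 1) / 2 % 2 = 0 then F else S := by
        rw [show ((n : Int) - 1) = (((n - 1 : Nat) : Int)) by omega]
        simp only [pvPat, hdm (n - 1), beq_iff_eq, Nat.cast_eq_zero]
      have hprev : ((n : Int) + 1) - 1 = ((n : Nat) : Int) := by ring
      rcases Nat.even_or_odd n with he | ho
      · -- n even (hence n ≥ 2): counter at entry of row n reads 2, patterns switch
        have hne : n % 2 = 0 := Nat.even_iff.mp he
        have hc : ((((n - 1) % 2 : Nat)) : Int) + 1 = 2 := by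
          rw [show (n - 1) % 2 = 1 by omega]; norm_num
        rw [hc, if_pos (show ((2 : Int) == 2) = true from rfl)]
        have hswap : (if (pvPat F S ((n : Int) - 1) == F) = true then S else F)
            = pvPat F S ((n : Int)) := by
          rw [hpatn, hpatn1]
          by_cases hq : (n - 1) / 2 % 2 = 0
          · rw [if_pos hq, if_pos (beq_self_eq_true F),
                if_neg (by omega : ¬ n / 2 % 2 = 0)]
          · rw [if_neg hq, if_neg (fun h => hSF h), if_pos (by omega : n / 2 % 2 = 0)]
        refine Prod.ext ?_ (Prod.ext ?_ ?_)
        · show (0 : Int) + 1 = (((n + 1 - 1) % 2 : Nat) : Int) + 1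
          rw [show (n + 1 - 1) % 2 = 0 by omega]; norm_num
        · show (if (pvPat F S ((n : Int) - 1) == F) = true then S else F)
            = pvPat F S ((n : Int) + 1 - 1)
          rw [hswap, hprev]
        · simp only [PySem.List.foldl_append_singleton_eq_map, List.flatMap_cons,
            List.flatMap_nil, List.append_nil, hswap]
      · -- n odd: counter at entry reads 1, no switch
        have hno : n % 2 = 1 := Nat.odd_iff.mp ho
        rw [show (n - 1) % 2 = 0 by omega, Nat.cast_zero,
            show ((0 : Int) + 1 == 2) = false from rfl]
        simp only [Bool.false_eq_true, if_false]
        refine Prod.ext ?_ (Prod.ext ?_ ?_)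
        · show (0 : Int) + 1 + 1 = (((n + 1 - 1) % 2 : Nat) : Int) + 1
          rw [show (n + 1 - 1) % 2 = 1 by omega]; norm_num
        · show pvPat F S ((n : Int) - 1) = pvPat F S ((n : Int) + 1 - 1)
          rw [hprev, hpatn, hpatn1, show (n - 1) / 2 = n / 2 by omega]
        · simp only [PySem.List.foldl_append_singleton_eq_map, List.flatMap_cons,
            List.flatMap_nil, List.append_nil]
          rw [hpatn, hpatn1, show (n - 1) / 2 = n / 2 by omega]

-- ===== B-side lemmas: the flat filter, row by row =====

-- k = m*n + j with 0 ≤ j < n: the column of cell k is j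
lemma pvModRow (n m j : Nat) (hn : 1 ≤ n) (hj : j < n) :
    PySem.Int.mod ((m : Int) * n + j) (n : Int) = (j : Int) := by
  rw [PySem.Int.mod_eq_emod_of_pos (by exact_mod_cast hn)]
  rw [show (m : Int) * n + j = (j : Int) + n * m by ring, Int.add_mul_emod_self_left]
  exact Int.emod_eq_of_lt (by positivity) (by exact_mod_cast hj)

-- k = m*n + j with 0 ≤ j < n: the two-row block of cell k is m/2
lemma pvDivRow (n m j : Nat) (hn : 1 ≤ n) (hj : j < n) :
    PySem.Int.floordiv ((m : Int) * n + j) (2 * n) = ((m / 2 : Nat) : Int) := by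
  rw [PySem.Int.floordiv_eq_iff_of_pos (by exact_mod_cast (by omega : (0:Int) < 2 * n))]
  have hm : m = 2 * (m / 2) + m % 2 := (Nat.div_add_mod m 2).symm
  have hr : m % 2 ≤ 1 := by omega
  constructor
  · have h1 : (m / 2) * (2 * n) ≤ m * n + j := by
      calc (m / 2) * (2 * n) = (2 * (m / 2)) * n := by ring
        _ ≤ m * n := Nat.mul_le_mul_right n (by omega)
        _ ≤ m * n + j := Nat.le_add_right _ _
    exact_mod_cast h1
  · have h2 : m * n + j < (m / 2 + 1) * (2 * n) := by
      calc m * n + j < m * n + n := by omega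
        _ ≤ (2 * (m / 2) + 1) * n + n := by
            exact Nat.add_le_add_right (Nat.mul_le_mul_right n (by omega)) n
        _ = (m / 2 + 1) * (2 * n) := by ring
    exact_mod_cast h2

-- filtering a Nat range by column parity gives exactly the even / odd pattern
lemma pvFilterEven (n : Nat) :
    (((List.range n).filter (fun k => decide (k % 2 = 0))).map (fun k : Nat => (k : Int)))
      = pvEvens n := by
  induction n with
  | zero => simp [pvEvens]
  | succ n ih =>
    rw [List.range_succ, List.filter_append, List.map_append, ih]
    rcases Nat.even_or_odd n with he | ho
    · have h := Nat.even_iff.mp he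
      rw [pvEvens_succ_even n h]
      simp [h]
    · have h := Nat.odd_iff.mp ho
      rw [pvEvens_succ_odd n h]
      simp [h]

lemma pvFilterOdd (n : Nat) :
    (((List.range n).filter (fun k => decide (k % 2 = 1))).map (fun k : Nat => (k : Int)))
      = pvOdds n := by
  induction n with
  | zero => simp [pvOdds]
  | succ n ih =>
    rw [List.range_succ, List.filter_append, List.map_append, ih]
    rcases Nat.even_or_odd n with he | ho
    · have h := Nat.even_iff.mp he
      rw [pvOdds_succ_even n h]
      simp [h]
    · have h := Nat.odd_iff.mp ho
      rw [pvOdds_succ_odd n h]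
      simp [h]

-- one row of the flat filter equals A's pattern for that row, shifted
lemma pvRowFilter (n : Nat) (hn : 1 ≤ n) (m : Nat) :
    (PySem.List.pyRange ((m : Int) * n) ((m : Int) * n + n) 1).filter (pvP (n : Int))
      = (pvPat (pvEvens n) (pvOdds n) (m : Int)).map (fun f => f + (m : Int) * n) := by
  rw [PySem.List.pyRange_one]
  rw [show ((m : Int) * n + n - (m : Int) * n).toNat = n by omega]
  rw [List.filter_map]
  have hpred : ∀ j ∈ List.range n,
      (pvP (n : Int) ∘ (fun k : Nat => (m : Int) * n + k)) j
        = decide ((j + m / 2) % 2 = 0) := by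
    intro j hj
    have hjn : j < n := List.mem_range.mp hj
    show pvP (n : Int) ((m : Int) * n + j) = _
    unfold pvP
    rw [pvModRow n m j hn hjn, pvDivRow n m j hn hjn,
        show (j : Int) + ((m / 2 : Nat) : Int) = ((j + m / 2 : Nat) : Int) by push_cast; ring,
        show PySem.Int.mod ((j + m / 2 : Nat) : Int) 2 = (((j + m / 2) % 2 : Nat) : Int) by
          exact_mod_cast PySem.Int.mod_natCast (j + m / 2) 2]
    by_cases hz : (j + m / 2) % 2 = 0
    · simp [hz]
    · simp [hz]
      omega
  rw [List.filter_congr hpred]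
  have hpat : pvPat (pvEvens n) (pvOdds n) ((m : Int))
      = if m / 2 % 2 = 0 then pvEvens n else pvOdds n := by
    unfold pvPat
    rw [show PySem.Int.floordiv ((m : Int)) 2 = ((m / 2 : Nat) : Int) from
          PySem.Int.floordiv_natCast m 2,
        show PySem.Int.mod ((m / 2 : Nat) : Int) 2 = ((m / 2 % 2 : Nat) : Int) by
          exact_mod_cast PySem.Int.mod_natCast (m / 2) 2]
    simp only [beq_iff_eq, Nat.cast_eq_zero]
  rcases Nat.even_or_odd (m / 2) with he | ho
  · have h := Nat.even_iff.mp he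
    rw [hpat, if_pos h]
    rw [List.filter_congr (fun j _ => by
      show decide ((j + m / 2) % 2 = 0) = decide (j % 2 = 0)
      simp only [decide_eq_decide]; omega)]
    rw [← pvFilterEven n, List.map_map]
    exact List.map_congr_left (fun j _ => by
      show (m : Int) * n + j = (j : Int) + (m : Int) * n
      ring)
  · have h := Nat.odd_iff.mp ho
    rw [hpat, if_neg (by omega)]
    rw [List.filter_congr (fun j _ => by
      show decide ((j + m / 2) % 2 = 0) = decide (j % 2 = 1)
      simp only [decide_eq_decide]; omega)]
    rw [← pvFilterOdd n, List.map_map]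
    exact List.map_congr_left (fun j _ => by
      show (m : Int) * n + j = (j : Int) + (m : Int) * n
      ring)

-- the whole flat filter over m rows equals A's row-by-row flatMap
lemma pvFilterRows (n : Nat) (hn : 1 ≤ n) (m : Nat) :
    (PySem.List.pyRange 0 ((m : Int) * n) 1).filter (pvP (n : Int))
      = (PySem.List.pyRange 0 (m : Int) 1).flatMap
          (fun i => (pvPat (pvEvens n) (pvOdds n) i).map (fun field => field + i * n)) := by
  induction m with
  | zero => simp [PySem.List.pyRange_one_eq_nil]
  | succ m ih =>
    have h1 : (0 : Int) ≤ (m : Int) * n := by positivity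
    have h2 : (m : Int) * n ≤ ((m + 1 : Nat) : Int) * n := by push_cast; nlinarith
    rw [PySem.List.pyRange_one_append 0 ((m : Int) * n) (((m + 1 : Nat) : Int) * n) h1 h2,
        List.filter_append, ih,
        show (((m + 1 : Nat) : Int)) = (m : Int) + 1 by push_cast; ring,
        PySem.List.pyRange_one_succ_right (by positivity), List.flatMap_append]
    congr 1
    rw [show ((m : Int) + 1) * n = (m : Int) * n + n by ring, pvRowFilter n hn m]
    simp

-- B-side: periodicity and tiling lemmas
def pvBaseL (n : Nat) : List Int :=
  (PySem.List.pyRange 0 (4 * (n : Int)) 1).filter (pvP (n : Int))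

lemma pvRangeFilterLt (L M : Nat) :
    (List.range L).filter (fun k => decide (k < M)) = List.range (min L M) := by
  induction L with
  | zero => simp
  | succ L ih =>
    rw [List.range_succ, List.filter_append, ih]
    by_cases h : L < M
    · rw [show min L M = L by omega, show min (L + 1) M = L + 1 by omega, List.range_succ]
      simp [h]
    · rw [show min (L + 1) M = min L M by omega]
      simp [h]

lemma pvTruncRange (a b c : Int) (h1 : a ≤ c) (h2 : c ≤ b) :
    (PySem.List.pyRange a b 1).filter (fun x => decide (x < c)) = PySem.List.pyRange a c 1 := by
  rw [PySem.List.pyRange_one, PySem.List.pyRange_one, List.filter_map]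
  have hc : ∀ k ∈ List.range (b - a).toNat,
      ((fun x => decide (x < c)) ∘ (fun k : Nat => a + (k : Int))) k
        = decide (k < (c - a).toNat) := by
    intro k _
    show decide (a + (k : Int) < c) = decide (k < (c - a).toNat)
    simp only [decide_eq_decide]
    omega
  rw [List.filter_congr hc, pvRangeFilterLt,
      show min (b - a).toNat (c - a).toNat = (c - a).toNat by omega]

lemma pvPeriodic (n t k : Nat) (hn : 1 ≤ n) :
    pvP (n : Int) (4 * (n : Int) * (t : Int) + (k : Int)) = pvP (n : Int) (k : Int) := by
  have hn' : (0 : Int) < n := by exact_mod_cast hn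
  unfold pvP
  have h1 : PySem.Int.mod (4 * (n : Int) * t + k) n = PySem.Int.mod (k : Int) n := by
    rw [PySem.Int.mod_eq_emod_of_pos hn', PySem.Int.mod_eq_emod_of_pos hn',
        show 4 * (n : Int) * t + k = (k : Int) + (n : Int) * (4 * t) by ring,
        Int.add_mul_emod_self_left]
  have h2 : PySem.Int.floordiv (4 * (n : Int) * t + k) (2 * n)
      = PySem.Int.floordiv (k : Int) (2 * n) + 2 * t := by
    rw [PySem.Int.floordiv_eq_ediv_of_pos (by omega), PySem.Int.floordiv_eq_ediv_of_pos (by omega),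
        show 4 * (n : Int) * t + k = (k : Int) + 2 * t * (2 * n) by ring,
        Int.add_mul_ediv_right _ _ (by omega : (2 * (n : Int)) ≠ 0)]
  rw [h1, h2,
      show PySem.Int.mod (k : Int) n + (PySem.Int.floordiv (k : Int) (2 * n) + 2 * t)
        = (PySem.Int.mod (k : Int) n + PySem.Int.floordiv (k : Int) (2 * n)) + 2 * (t : Int) by ring,
      PySem.Int.mod_eq_emod_of_pos (by norm_num : (0 : Int) < 2),
      PySem.Int.mod_eq_emod_of_pos (by norm_num : (0 : Int) < 2),
      Int.add_mul_emod_self_left]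

lemma pvBlockShift (n t : Nat) (hn : 1 ≤ n) :
    (PySem.List.pyRange (4 * (n : Int) * t) (4 * (n : Int) * t + 4 * (n : Int)) 1).filter
        (pvP (n : Int))
      = (pvBaseL n).map (fun k => k + 4 * (n : Int) * t) := by
  unfold pvBaseL
  rw [PySem.List.pyRange_one, PySem.List.pyRange_one, List.filter_map, List.filter_map,
      List.map_map,
      show (4 * (n : Int) * t + 4 * (n : Int) - 4 * (n : Int) * t).toNat = 4 * n by omega,
      show ((4 * (n : Int)) - 0).toNat = 4 * n by omega]
  have hp : ∀ k ∈ List.range (4 * n),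
      (pvP (n : Int) ∘ (fun k : Nat => 4 * (n : Int) * t + (k : Int))) k
        = (pvP (n : Int) ∘ (fun k : Nat => (0 : Int) + (k : Int))) k := by
    intro k _
    show pvP (n : Int) (4 * (n : Int) * t + (k : Int)) = pvP (n : Int) ((0 : Int) + (k : Int))
    rw [pvPeriodic n t k hn]
    norm_num
  rw [List.filter_congr hp]
  exact List.map_congr_left (fun k _ => by
    show 4 * (n : Int) * t + (k : Int) = (0 : Int) + (k : Int) + 4 * (n : Int) * t
    ring)

lemma pvFullBlocks (n : Nat) (hn : 1 ≤ n) : ∀ t : Nat, 4 * t ≤ n →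
    (PySem.List.pyRange 0 (4 * (n : Int) * t) 1).filter (pvP (n : Int))
      = (PySem.List.pyRange 0 (t : Int) 1).flatMap
          (fun u => (pvBaseL n).map (fun k => k + 4 * (n : Int) * u)) := by
  intro t
  induction t with
  | zero =>
    intro _
    simp [PySem.List.pyRange_one_eq_nil]
  | succ t ih =>
    intro h
    have h4 : (0 : Int) ≤ 4 * (n : Int) * t := by positivity
    have h5 : 4 * (n : Int) * t ≤ 4 * (n : Int) * ((t + 1 : Nat) : Int) := by
      have h0 : (0 : Int) ≤ 4 * (n : Int) := by positivity
      push_cast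
      nlinarith
    rw [PySem.List.pyRange_one_append 0 (4 * (n : Int) * t) (4 * (n : Int) * ((t + 1 : Nat) : Int))
          h4 h5,
        List.filter_append, ih (by omega),
        show (((t + 1 : Nat) : Int)) = (t : Int) + 1 by push_cast; ring,
        PySem.List.pyRange_one_succ_right (by positivity), List.flatMap_append]
    congr 1
    rw [show 4 * (n : Int) * ((t : Int) + 1) = 4 * (n : Int) * t + 4 * (n : Int) by ring,
        pvBlockShift n t hn]
    simp

lemma pvTail (n : Nat) (hn : 1 ≤ n) :
    ((pvBaseL n).filter
        (fun k => decide (k + 4 * (n : Int) * ((n / 4 : Nat) : Int) < (n : Int) * n))).map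
        (fun k => k + 4 * (n : Int) * ((n / 4 : Nat) : Int))
      = (PySem.List.pyRange (4 * (n : Int) * ((n / 4 : Nat) : Int)) ((n : Int) * n) 1).filter
          (pvP (n : Int)) := by
  have hq1 : 4 * (n : Int) * ((n / 4 : Nat) : Int) ≤ (n : Int) * n := by
    have h : 4 * (n / 4) * n ≤ n * n := Nat.mul_le_mul_right n (by omega)
    calc 4 * (n : Int) * ((n / 4 : Nat) : Int) = ((4 * (n / 4) * n : Nat) : Int) := by
          push_cast; ring
      _ ≤ ((n * n : Nat) : Int) := by exact_mod_cast h
      _ = (n : Int) * n := by push_cast; ring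
  have hq2 : (n : Int) * n ≤ 4 * (n : Int) * ((n / 4 : Nat) : Int) + 4 * (n : Int) := by
    have h : n * n ≤ (4 * (n / 4) + 4) * n := Nat.mul_le_mul_right n (by omega)
    calc (n : Int) * n = ((n * n : Nat) : Int) := by push_cast; ring
      _ ≤ (((4 * (n / 4) + 4) * n : Nat) : Int) := by exact_mod_cast h
      _ = 4 * (n : Int) * ((n / 4 : Nat) : Int) + 4 * (n : Int) := by push_cast; ring
  have hmf : ((pvBaseL n).filter
        (fun k => decide (k + 4 * (n : Int) * ((n / 4 : Nat) : Int) < (n : Int) * n))).map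
        (fun k => k + 4 * (n : Int) * ((n / 4 : Nat) : Int))
      = ((pvBaseL n).map (fun k => k + 4 * (n : Int) * ((n / 4 : Nat) : Int))).filter
          (fun x => decide (x < (n : Int) * n)) := by
    rw [List.filter_map]
    rfl
  rw [hmf, ← pvBlockShift n (n / 4) hn, List.filter_comm,
      pvTruncRange (4 * (n : Int) * ((n / 4 : Nat) : Int))
        (4 * (n : Int) * ((n / 4 : Nat) : Int) + 4 * (n : Int)) ((n : Int) * n) hq1 hq2]

lemma pvAltEq (n : Nat) (hn : 1 ≤ n) :
    generateDraw_alt (n : Int)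
      = (PySem.List.pyRange 0 ((n : Int) * n) 1).filter (pvP (n : Int)) := by
  have hn' : (0 : Int) < n := by exact_mod_cast hn
  unfold generateDraw_alt
  rw [if_neg (by omega)]
  show ((PySem.List.pyRange 0 (PySem.Int.floordiv ((n : Int) * n) (4 * (n : Int))) 1).foldl
      (fun out t => out ++ (pvBaseL n).map (fun k => k + 4 * (n : Int) * t)) [])
    ++ ((pvBaseL n).filter
        (fun k => decide (k + 4 * (n : Int) * (PySem.Int.floordiv ((n : Int) * n) (4 * (n : Int)))
          < (n : Int) * n))).map
        (fun k => k + 4 * (n : Int) * (PySem.Int.floordiv ((n : Int) * n) (4 * (n : Int))))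
    = _
  have hdiv : PySem.Int.floordiv ((n : Int) * n) (4 * (n : Int)) = ((n / 4 : Nat) : Int) := by
    rw [show ((n : Int) * n) = ((n * n : Nat) : Int) by push_cast; ring,
        show (4 * (n : Int)) = ((4 * n : Nat) : Int) by push_cast; ring,
        PySem.Int.floordiv_natCast]
    congr 1
    rw [mul_comm 4 n, Nat.mul_div_mul_left n 4 (by omega)]
  rw [hdiv, PySem.List.foldl_append_eq_flatMap, List.nil_append,
      ← pvFullBlocks n hn (n / 4) (by omega), pvTail n hn,
      PySem.List.pyRange_one_append 0 (4 * (n : Int) * ((n / 4 : Nat) : Int)) ((n : Int) * n)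
        (by positivity)
        (by
          have h : 4 * (n / 4) * n ≤ n * n := Nat.mul_le_mul_right n (by omega)
          calc 4 * (n : Int) * ((n / 4 : Nat) : Int) = ((4 * (n / 4) * n : Nat) : Int) := by
                push_cast; ring
            _ ≤ ((n * n : Nat) : Int) := by exact_mod_cast h
            _ = (n : Int) * n := by push_cast; ring),
      List.filter_append]

theorem generateDraw_spec : Claim_equal_generateDraw := by
  unfold Claim_equal_generateDraw
  intro d _
  unfold Spec_generateDraw
  rcases le_or_gt d 0 with hd | hd
  · unfold generateDraw generateDraw_alt
    rw [if_pos hd, PySem.List.pyRange_one_eq_nil hd]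
    simp
  · obtain ⟨n, rfl⟩ : ∃ n : Nat, d = (n : Int) := ⟨d.toNat, by omega⟩
    have hn : 1 ≤ n := by exact_mod_cast hd
    rw [pvAltEq n hn]
    unfold generateDraw
    simp only [pvFirstLoop n]
    rw [pvSecondLoop (n : Int) (pvEvens n) (pvOdds n) (pvEvens_ne_pvOdds n hn) n hn]
    exact (pvFilterRows n hn n).symm
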